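-- pv_equiv track=rewrite | github.com/pypi-data/pypi-mirror-361 | packages/dockwatch/dockwatch-1.0-py3-none-any.whl/dockwatch/image_analyzer.py | get_image_suggestions
-- ===== SOURCE A (Python) =====
-- def get_image_suggestions(image_name: str):
--     """
--     Provide suggestions based on common base image names.
--     """
--     suggestions = []
--     name = image_name.lower()
--
--     base = name.split(":")[0].split("@")[0]
--
--     if any(x in base for x in ["ubuntu", "debian"]):
--         suggestions.append("Consider using Alpine Linux (`alpine` tag) or slim variants to reduce image size.")
--         suggestions.append("Use multi-stage builds to separate build and runtime dependencies.")
--     elif "node" in base: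
--         suggestions.append("Consider using `node:alpine` or `node:slim` images for smaller size.")
--         suggestions.append("Use `.dockerignore` to avoid copying unnecessary files.")
--     elif "python" in base:
--         suggestions.append("Use `python:slim` or `python:alpine` for a smaller footprint.")
--         suggestions.append("Remove cache and temp files after package installation.")
--     elif "golang" in base:
--         suggestions.append("Use multi-stage builds to produce minimal final images.")
--     elif "openjdk" in base or "java" in base:
--         suggestions.append("Consider using Distroless Java images or Alpine OpenJDK for smaller size.")
--     elif "mongo" in base or "mysql" in base or "postgres" in base:
--         suggestions.append("Use official slim or minimal database images if available.")
--
--     return suggestions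
-- ===== SOURCE B (Python) =====
-- _KEYWORD_PRIORITY = {
--     "ubuntu": 0, "debian": 0,
--     "node": 1,
--     "python": 2,
--     "golang": 3,
--     "openjdk": 4, "java": 4,
--     "mongo": 5, "mysql": 5, "postgres": 5,
-- }
--
-- _SUGGESTIONS = [
--     ["Consider using Alpine Linux (`alpine` tag) or slim variants to reduce image size.",
--      "Use multi-stage builds to separate build and runtime dependencies."],
--     ["Consider using `node:alpine` or `node:slim` images for smaller size.",
--      "Use `.dockerignore` to avoid copying unnecessary files."],
--     ["Use `python:slim` or `python:alpine` for a smaller footprint.",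
--      "Remove cache and temp files after package installation."],
--     ["Use multi-stage builds to produce minimal final images."],
--     ["Consider using Distroless Java images or Alpine OpenJDK for smaller size."],
--     ["Use official slim or minimal database images if available."],
-- ]
--
--
-- def _pick(base):
--     hits = [prio for kw, prio in _KEYWORD_PRIORITY.items() if kw in base]
--     if not hits:
--         return []
--     return list(_SUGGESTIONS[min(hits)])
--
--
-- def get_image_suggestions(image_name: str):
--     return _pick(image_name.lower().split(":")[0].split("@")[0])
-- ===== Notes on version B (the rewrite author's own statement) =====
-- stated objective: alternative
-- what changed: B scans all keywords of a keyword-to-priority map, collects every matching keyword's priority, and returns the suggestion list of the minimum priority, instead of A's ordered if/elif cascade with early commitment to the first matching category.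
import Mathlib
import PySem

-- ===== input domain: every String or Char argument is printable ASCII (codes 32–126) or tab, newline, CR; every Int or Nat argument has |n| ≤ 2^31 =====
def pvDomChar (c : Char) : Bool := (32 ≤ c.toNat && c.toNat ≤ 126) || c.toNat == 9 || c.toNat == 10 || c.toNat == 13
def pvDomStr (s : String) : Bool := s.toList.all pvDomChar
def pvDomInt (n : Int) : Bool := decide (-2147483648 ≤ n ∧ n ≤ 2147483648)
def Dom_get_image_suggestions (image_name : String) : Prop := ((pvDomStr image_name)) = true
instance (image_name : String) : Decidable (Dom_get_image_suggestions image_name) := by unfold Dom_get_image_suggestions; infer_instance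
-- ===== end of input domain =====

-- B collects every matching keyword's priority from a keyword→priority table and returns the suggestions of the minimum priority, instead of A's early-committing if/elif cascade (objective: alternative).


-- ===== PORT A =====
def get_image_suggestions (image_name : String) : List String :=
  let name := PySem.Str.lower image_name
  -- split(":")[0] / split("@")[0]: separators are non-empty so split? = some, and the list is non-empty so [0] = headD ""
  let base := (((PySem.Str.split? ((((PySem.Str.split? name ":").getD []).headD "")) "@").getD []).headD "")
  if ["ubuntu", "debian"].any (fun x => PySem.Str.isIn x base) then
    ["Consider using Alpine Linux (`alpine` tag) or slim variants to reduce image size.",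
     "Use multi-stage builds to separate build and runtime dependencies."]
  else if PySem.Str.isIn "node" base then
    ["Consider using `node:alpine` or `node:slim` images for smaller size.",
     "Use `.dockerignore` to avoid copying unnecessary files."]
  else if PySem.Str.isIn "python" base then
    ["Use `python:slim` or `python:alpine` for a smaller footprint.",
     "Remove cache and temp files after package installation."]
  else if PySem.Str.isIn "golang" base then
    ["Use multi-stage builds to produce minimal final images."]
  else if PySem.Str.isIn "openjdk" base || PySem.Str.isIn "java" base then
    ["Consider using Distroless Java images or Alpine OpenJDK for smaller size."]
  else if PySem.Str.isIn "mongo" base || PySem.Str.isIn "mysql" base || PySem.Str.isIn "postgres" base then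
    ["Use official slim or minimal database images if available."]
  else []

-- ===== PORT B =====
-- keyword → priority map (a dict whose items are all scanned; no early exit)
def pvKeywordPriority : List (String × Int) :=
  [("ubuntu", 0), ("debian", 0), ("node", 1), ("python", 2), ("golang", 3),
   ("openjdk", 4), ("java", 4), ("mongo", 5), ("mysql", 5), ("postgres", 5)]

def pvSuggestions : List (List String) :=
  [ ["Consider using Alpine Linux (`alpine` tag) or slim variants to reduce image size.",
     "Use multi-stage builds to separate build and runtime dependencies."],
    ["Consider using `node:alpine` or `node:slim` images for smaller size.",
     "Use `.dockerignore` to avoid copying unnecessary files."],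
    ["Use `python:slim` or `python:alpine` for a smaller footprint.",
     "Remove cache and temp files after package installation."],
    ["Use multi-stage builds to produce minimal final images."],
    ["Consider using Distroless Java images or Alpine OpenJDK for smaller size."],
    ["Use official slim or minimal database images if available."] ]

-- Source B's _pick: collect the priorities of all matching keywords, return the suggestions of the minimum
def pvPick (base : String) : List String :=
  let hits := (pvKeywordPriority.filter (fun p => PySem.Str.isIn p.1 base)).map Prod.snd
  match PySem.List.min? hits (fun x => x) with
  | none => []
  | some m => (PySem.List.pyGet? pvSuggestions m).getD []  -- min(hits) is always a valid index 0..5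

def get_image_suggestions_alt (image_name : String) : List String :=
  -- same base computation as Source B: lower, split(":")[0], split("@")[0] (non-empty separators, non-empty result lists)
  pvPick (((PySem.Str.split? ((((PySem.Str.split? (PySem.Str.lower image_name) ":").getD []).headD "")) "@").getD []).headD "")

-- ===== PRECONDITION & SPEC =====
def Spec_get_image_suggestions (image_name : String) (out : List String) : Prop := out = get_image_suggestions_alt image_name
instance (image_name : String) (out : List String) : Decidable (Spec_get_image_suggestions image_name out) := by unfold Spec_get_image_suggestions; infer_instance

-- ===== CLAIM (what is proved, stated in full; the proofs are below) =====
def Claim_equal_get_image_suggestions : Prop := ∀ (image_name : String), Dom_get_image_suggestions image_name → Spec_get_image_suggestions image_name (get_image_suggestions image_name)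

-- ===== LEMMAS AND PROOFS =====
-- A's cascade equals B's min-over-matching-priorities computation for every base string:
-- both sides are functions of the ten substring tests, so reduce to ten Booleans and check all 1024 cases.
set_option maxHeartbeats 1000000 in
theorem cascade_eq_minRule (base : String) :
    (if ["ubuntu", "debian"].any (fun x => PySem.Str.isIn x base) then
      ["Consider using Alpine Linux (`alpine` tag) or slim variants to reduce image size.",
       "Use multi-stage builds to separate build and runtime dependencies."]
    else if PySem.Str.isIn "node" base then
      ["Consider using `node:alpine` or `node:slim` images for smaller size.",
       "Use `.dockerignore` to avoid copying unnecessary files."]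
    else if PySem.Str.isIn "python" base then
      ["Use `python:slim` or `python:alpine` for a smaller footprint.",
       "Remove cache and temp files after package installation."]
    else if PySem.Str.isIn "golang" base then
      ["Use multi-stage builds to produce minimal final images."]
    else if PySem.Str.isIn "openjdk" base || PySem.Str.isIn "java" base then
      ["Consider using Distroless Java images or Alpine OpenJDK for smaller size."]
    else if PySem.Str.isIn "mongo" base || PySem.Str.isIn "mysql" base || PySem.Str.isIn "postgres" base then
      ["Use official slim or minimal database images if available."]
    else []) =
    pvPick base := by
  simp only [pvPick, pvKeywordPriority, List.filter_cons, List.filter_nil, List.any_cons,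
    List.any_nil, Bool.or_false]
  generalize PySem.Str.isIn "ubuntu" base = b1
  generalize PySem.Str.isIn "debian" base = b2
  generalize PySem.Str.isIn "node" base = b3
  generalize PySem.Str.isIn "python" base = b4
  generalize PySem.Str.isIn "golang" base = b5
  generalize PySem.Str.isIn "openjdk" base = b6
  generalize PySem.Str.isIn "java" base = b7
  generalize PySem.Str.isIn "mongo" base = b8
  generalize PySem.Str.isIn "mysql" base = b9
  generalize PySem.Str.isIn "postgres" base = b10
  revert b1 b2 b3 b4 b5 b6 b7 b8 b9 b10
  decide

-- ===== VERDICT (by name: the statement is the Claim_ definition above) =====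
set_option maxHeartbeats 1000000 in
theorem get_image_suggestions_spec : Claim_equal_get_image_suggestions := by
  intro s _
  unfold Spec_get_image_suggestions get_image_suggestions get_image_suggestions_alt
  exact cascade_eq_minRule _
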